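-- pv_equiv track=rewrite | github.com/kldtz/CharSplit | kirke/utils/strutils.py | using_split2
-- ===== SOURCE A (Python) =====
-- from typing import Any, Dict, Generator, List, Match, Optional
-- from typing import Pattern, Set, Tuple, Union
--
-- def using_split2(line, _len=len) -> List[Tuple[int, int, str]]:
--     words = line.split()
--     index = line.index
--     offsets = []  # type: List[Tuple[int, int, str]]
--     append = offsets.append
--     running_offset = 0
--     for word in words:
--         word_offset = index(word, running_offset)
--         word_len = _len(word)
--         running_offset = word_offset + word_len
--         append((word_offset, running_offset, word))
--     return offsets
-- ===== SOURCE B (Python) =====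
-- def using_split2(line, _len=len):
--     offsets = []
--     i = 0
--     n = _len(line)
--     while i < n:
--         if line[i].isspace():
--             i += 1
--         else:
--             start = i
--             while i < n and not line[i].isspace():
--                 i += 1
--             offsets.append((start, i, line[start:i]))
--     return offsets
-- ===== Notes on version B (the rewrite author's own statement) =====
-- stated objective: alternative
-- what changed: Replaces split()+repeated line.index substring searches with a single direct index scan that records each non-whitespace run's start and end as it passes; trades C-level split/index calls for one explicit O(n) pass.
import Mathlib
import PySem

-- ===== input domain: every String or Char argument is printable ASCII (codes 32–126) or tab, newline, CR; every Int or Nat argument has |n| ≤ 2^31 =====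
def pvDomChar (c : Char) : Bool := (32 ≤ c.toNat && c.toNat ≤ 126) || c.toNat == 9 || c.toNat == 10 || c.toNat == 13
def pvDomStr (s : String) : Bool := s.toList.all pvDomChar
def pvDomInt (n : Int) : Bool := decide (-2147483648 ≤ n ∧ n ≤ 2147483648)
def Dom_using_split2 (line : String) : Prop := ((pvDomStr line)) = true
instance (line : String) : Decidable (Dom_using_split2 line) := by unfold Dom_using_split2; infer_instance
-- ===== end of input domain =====

-- B replaces split()+repeated line.index searches with one direct character scan; same return value.

-- ===== PORT A =====
-- transliteration of A: words = line.split(); for word in words: word_offset = line.index(word, running_offset); …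
-- (line.index always succeeds on split()'s own words, so PySem.Str.findFrom computes index's value exactly)
def using_split2 (line : String) : List (Int × Int × String) :=
  let words := PySem.Str.split₀ line
  (words.foldl
    (fun (st : List (Int × Int × String) × Int) (word : String) =>
      let wordOffset := PySem.Str.findFrom line word st.2
      let wordLen := PySem.Str.len word
      (st.1 ++ [(wordOffset, wordOffset + wordLen, word)], wordOffset + wordLen))
    ([], 0)).1

-- ===== PORT B =====
-- the outer while-loop of Source B as structural recursion on the remaining characters, carrying the
-- running index i; the inner while-loop that collects a non-whitespace run is the takeWhile/dropWhile pair
def usGo (cs : List Char) (i : Int) : List (Int × Int × String) :=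
  match cs with
  | [] => []
  | c :: rest =>
    if PySem.Chars.isspace c then usGo rest (i + 1)
    else
      let tok := c :: rest.takeWhile (fun d => !PySem.Chars.isspace d)
      (i, i + (tok.length : Int), String.ofList tok) ::
        usGo (rest.dropWhile (fun d => !PySem.Chars.isspace d)) (i + (tok.length : Int))
termination_by cs.length
decreasing_by
  · simp
  · have := List.length_dropWhile_le (fun d => !PySem.Chars.isspace d) rest
    simp; omega

def using_split2_alt (line : String) : List (Int × Int × String) :=
  usGo line.toList 0

-- ===== PRECONDITION & SPEC =====
def Spec_using_split2 (line : String) (out : List (Int × Int × String)) : Prop := out = using_split2_alt line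
instance (line : String) (out : List (Int × Int × String)) : Decidable (Spec_using_split2 line out) := by unfold Spec_using_split2; infer_instance

-- ===== CLAIM (what is proved, stated in full; the proofs are below) =====
def Claim_equal_using_split2 : Prop := ∀ (line : String), Dom_using_split2 line → Spec_using_split2 line (using_split2 line)

-- ===== LEMMAS AND PROOFS =====

-- the word list of line.split(), recomputed in the same takeWhile/dropWhile shape as usGo
def wordsOf (cs : List Char) : List (List Char) :=
  match cs with
  | [] => []
  | c :: rest =>
    if PySem.Chars.isspace c then wordsOf rest
    else (c :: rest.takeWhile (fun d => !PySem.Chars.isspace d)) ::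
         wordsOf (rest.dropWhile (fun d => !PySem.Chars.isspace d))
termination_by cs.length
decreasing_by
  · simp
  · have := List.length_dropWhile_le (fun d => !PySem.Chars.isspace d) rest
    simp; omega

lemma split₀_go_eq (cs : List Char) : ∀ (cur : List Char) (acc : List (List Char)),
    PySem.Chars.split₀.go cs cur acc =
      acc.reverse ++ (if cur.isEmpty then wordsOf cs
        else (cur.reverse ++ cs.takeWhile (fun d => !PySem.Chars.isspace d)) ::
             wordsOf (cs.dropWhile (fun d => !PySem.Chars.isspace d))) := by
  induction cs with
  | nil =>
    intro cur acc
    by_cases h : cur.isEmpty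
    · simp [PySem.Chars.split₀.go, h, wordsOf]
    · simp [PySem.Chars.split₀.go, h, wordsOf]
  | cons c rest ih =>
    intro cur acc
    by_cases hs : PySem.Chars.isspace c
    · by_cases h : cur.isEmpty
      · simp [PySem.Chars.split₀.go, hs, h, ih, wordsOf]
      · simp [PySem.Chars.split₀.go, hs, h, ih, wordsOf, List.takeWhile, List.dropWhile]
    · simp [PySem.Chars.split₀.go, hs, ih, wordsOf, List.takeWhile, List.dropWhile]

lemma split₀_eq_wordsOf (cs : List Char) : PySem.Chars.split₀ cs = wordsOf cs := by
  simp [PySem.Chars.split₀, split₀_go_eq]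

lemma find_spaces (sp tail : List Char) (c : Char) (tl : List Char)
    (hsp : ∀ x ∈ sp, PySem.Chars.isspace x = true)
    (hc : PySem.Chars.isspace c = false)
    (hpre : (c :: tl) <+: tail) :
    PySem.Chars.find (sp ++ tail) (c :: tl) = (sp.length : Int) := by
  have hocc : (c :: tl) <+: (sp ++ tail).drop sp.length := by
    rw [List.drop_left]; exact hpre
  have hnn : 0 ≤ PySem.Chars.find (sp ++ tail) (c :: tl) := by
    rw [PySem.Chars.find_nonneg_iff, ← PySem.Chars.isIn_iff_infix,
      ← PySem.Chars.exists_prefix_drop_iff_isIn]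
    exact ⟨sp.length, hocc⟩
  obtain ⟨hp, hmin⟩ := PySem.Chars.find_spec hnn
  set f := (PySem.Chars.find (sp ++ tail) (c :: tl)).toNat with hf
  have hle : f ≤ sp.length := by
    by_contra h
    exact hmin sp.length (by omega) hocc
  have hge : sp.length ≤ f := by
    by_contra h
    have hlt : f < sp.length := by omega
    have : (sp ++ tail).drop f = sp[f] :: ((sp ++ tail).drop (f+1)) := by
      rw [List.drop_eq_getElem_cons (by simp; omega)]
      congr 1
      exact List.getElem_append_left hlt
    rw [this] at hp
    have hce : sp[f] = c := by
      obtain ⟨t, ht⟩ := hp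
      simpa using congrArg (fun x => x.head?) ht.symm
    have := hsp sp[f] (List.getElem_mem _)
    rw [hce, hc] at this
    exact Bool.false_ne_true this
  omega

lemma mainA (s : List Char) :
    ∀ (n : Nat) (rest : List Char) (o k : Nat) (acc : List (Int × Int × String)),
      rest.length = n → s.drop k = rest → k ≤ s.length → o ≤ k →
      (∀ j, o ≤ j → j < k → PySem.Chars.isspace (s.getD j ' ') = true) →
      ((wordsOf rest).foldl
        (fun (st : List (Int × Int × String) × Int) (tok : List Char) =>
          (st.1 ++ [(PySem.Chars.findFrom s tok st.2,
             PySem.Chars.findFrom s tok st.2 + (tok.length : Int), String.ofList tok)],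
           PySem.Chars.findFrom s tok st.2 + (tok.length : Int)))
        (acc, (o : Int))).1 = acc ++ usGo rest (k : Int) := by
  intro n
  induction n using Nat.strong_induction_on with
  | _ n ih =>
    intro rest o k acc hlen hdrop hk hok hsp
    have hlen' : s.length = k + rest.length := by
      have := congrArg List.length hdrop
      simp [List.length_drop] at this
      omega
    match rest, hlen with
    | [], _ => simp [wordsOf, usGo]
    | c :: rest', hlen =>
      by_cases hs : PySem.Chars.isspace c
      · rw [show wordsOf (c :: rest') = wordsOf rest' by rw [wordsOf]; simp [hs]]
        rw [show usGo (c :: rest') (k : Int) = usGo rest' ((k : Int) + 1) by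
          rw [usGo]; simp [hs]]
        have hkd : s.drop (k + 1) = rest' := by
          have := congrArg List.tail hdrop
          simpa [List.tail_drop] using this
        have hck : s[k]'(by simp at hlen'; omega) = c := by
          have : (s.drop k)[0]'(by rw [hdrop]; simp) = c := by simp [hdrop]
          simpa using this
        have hrec := ih rest'.length (by have := hlen; simp at this; omega) rest' o (k + 1) acc rfl hkd
          (by simp at hlen'; omega) (by omega)
          (by
            intro j hj1 hj2
            by_cases hjk : j < k
            · exact hsp j hj1 hjk
            · have hjeq : j = k := by omega
              subst hjeq
              rw [List.getD_eq_getElem _ _ (by simp at hlen'; omega), hck]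
              exact hs)
        rw [show ((k : Int) + 1) = (((k + 1 : Nat)) : Int) by push_cast; ring]
        exact hrec
      · rw [show wordsOf (c :: rest') =
            (c :: rest'.takeWhile (fun d => !PySem.Chars.isspace d)) ::
              wordsOf (rest'.dropWhile (fun d => !PySem.Chars.isspace d)) by
          rw [wordsOf]; simp [hs]]
        rw [show usGo (c :: rest') (k : Int) =
            ((k : Int), (k : Int) + ((c :: rest'.takeWhile (fun d => !PySem.Chars.isspace d)).length : Int),
              String.ofList (c :: rest'.takeWhile (fun d => !PySem.Chars.isspace d))) ::
              usGo (rest'.dropWhile (fun d => !PySem.Chars.isspace d))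
                ((k : Int) + ((c :: rest'.takeWhile (fun d => !PySem.Chars.isspace d)).length : Int)) by
          rw [usGo]; simp [hs]]
        set tok := c :: rest'.takeWhile (fun d => !PySem.Chars.isspace d) with htok
        set rest2 := rest'.dropWhile (fun d => !PySem.Chars.isspace d) with hrest2
        have hsplit : c :: rest' = tok ++ rest2 := by
          rw [htok, hrest2]; simp [List.takeWhile_append_dropWhile]
        -- findFrom s tok o = k
        have hfind : PySem.Chars.findFrom s tok (o : Int) = (k : Int) := by
          have hol : o ≤ s.length := by omega
          rw [PySem.Chars.findFrom_natCast s tok o hol]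
          have hdo : s.drop o = (s.drop o).take (k - o) ++ (c :: rest') := by
            conv_lhs => rw [← List.take_append_drop (k - o) (s.drop o)]
            rw [List.drop_drop, show o + (k - o) = k by omega, hdrop]
          have hspall : ∀ x ∈ (s.drop o).take (k - o), PySem.Chars.isspace x = true := by
            intro x hx
            obtain ⟨i, hi, hxe⟩ := List.getElem_of_mem hx
            have hilt : i < k - o := by
              have := hi; simp [List.length_take] at this; omega
            have : x = s[o + i]'(by omega) := by
              rw [← hxe]; simp [List.getElem_take, List.getElem_drop]
            rw [this, ← List.getD_eq_getElem s ' ' (by omega)]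
            exact hsp (o + i) (by omega) (by omega)
          have hclen : ((s.drop o).take (k - o)).length = k - o := by
            simp [List.length_take, List.length_drop]; omega
          have hpre : tok <+: (c :: rest') := by
            rw [htok]
            exact List.cons_prefix_cons.mpr ⟨rfl, List.takeWhile_prefix _⟩
          have := find_spaces ((s.drop o).take (k - o)) (c :: rest') c
            (rest'.takeWhile (fun d => !PySem.Chars.isspace d)) hspall (by simpa using hs) hpre
          rw [hdo, htok, this, hclen]
          have hne : ((k - o : Nat) : Int) ≠ -1 := by omega
          rw [if_neg hne]
          omega
        simp only [List.foldl_cons, hfind]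
        have hlen2 : rest2.length < n := by
          have hls := congrArg List.length hsplit
          have hn : rest'.length + 1 = n := by simpa using hlen
          simp [htok] at hls
          omega
        have hdrop2 : s.drop (k + tok.length) = rest2 := by
          rw [← List.drop_drop, hdrop, hsplit]
          simp
        have hrec := ih rest2.length hlen2 rest2 (k + tok.length) (k + tok.length)
          (acc ++ [((k : Int), ((k + tok.length : Nat) : Int), String.ofList tok)]) rfl hdrop2
          (by
            have := congrArg List.length hsplit
            simp at this hlen'
            omega)
          (le_refl _) (by intro j h1 h2; omega)
        rw [show ((k : Int) + (tok.length : Int)) = (((k + tok.length : Nat)) : Int) by push_cast; ring]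
        rw [hrec, List.append_assoc]
        rfl

theorem using_split2_spec : Claim_equal_using_split2 := by
  intro line _
  unfold Spec_using_split2
  simp only [using_split2, using_split2_alt]
  rw [show PySem.Str.split₀ line = (wordsOf line.toList).map String.ofList by
    rw [← split₀_eq_wordsOf, ← PySem.Str.split₀_map_toList, List.map_map]
    simp [Function.comp_def]]
  rw [List.foldl_map]
  have h := mainA line.toList line.toList.length line.toList 0 0 [] rfl (by simp) (by simp)
    (le_refl 0) (by omega)
  simp only [Nat.cast_zero] at h
  simp only [PySem.Str.findFrom_eq, PySem.Str.len_eq]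
  simpa using h
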